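-- pv_equiv track=rewrite | github.com/kamiderka/WDI-2024 | Zestaw 2 - Tablice jednowymiarowe/zad087.py | biggest_prime_product
-- ===== SOURCE A (Python) =====
-- def is_prime(n :int)->bool:
--     if n < 2:
--         return False
--     i=2
--     while i*i<=n:
--         if n%i==0:
--             return False
--         i+=1
--     return True
--
-- def biggest_prime_product(t: list)->int | None:
--     index = None
--     best = 1
--     curr = t[0] if is_prime(t[0]) else 1
--     for i in range(1, len(t)):
--         if t[i] == curr and curr > best:
--             best = curr
--             index = i
--         if is_prime(t[i]):
--             curr *= t[i]
--     return index
-- ===== SOURCE B (Python) =====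
-- def is_prime(n: int) -> bool:
--     if n < 2:
--         return False
--     i = 2
--     while i * i <= n:
--         if n % i == 0:
--             return False
--         i += 1
--     return True
--
-- def biggest_prime_product(t: list) -> int | None:
--     # Prefix products of the primes seen so far: prods[k] = product of
--     # primes among t[0..k] (with t[0] contributing only if prime).
--     prods = []
--     p = t[0] if is_prime(t[0]) else 1
--     for x in t[1:]:
--         prods.append(p)
--         if is_prime(x):
--             p *= x
--     # Candidate positions: t[i] equals the running product and beats the
--     # initial best of 1.  A's scan picks the FIRST index achieving the
--     # maximal such product.
--     candidates = [(i + 1, q) for i, (x, q) in enumerate(zip(t[1:], prods))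
--                   if x == q and q > 1]
--     if not candidates:
--         return None
--     best = max(q for _, q in candidates)
--     return next(i for i, q in candidates if q == best)
-- ===== Notes on version B (the rewrite author's own statement) =====
-- stated objective: alternative
-- what changed: Replaces A's single stateful scan (index/best/curr mutated together) by a pipeline: build the prefix-prime-product table, filter the candidate positions where t[i] equals the table value and beats the initial best 1, then return the first index attaining the maximal candidate product via max/next.
import Mathlib
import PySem

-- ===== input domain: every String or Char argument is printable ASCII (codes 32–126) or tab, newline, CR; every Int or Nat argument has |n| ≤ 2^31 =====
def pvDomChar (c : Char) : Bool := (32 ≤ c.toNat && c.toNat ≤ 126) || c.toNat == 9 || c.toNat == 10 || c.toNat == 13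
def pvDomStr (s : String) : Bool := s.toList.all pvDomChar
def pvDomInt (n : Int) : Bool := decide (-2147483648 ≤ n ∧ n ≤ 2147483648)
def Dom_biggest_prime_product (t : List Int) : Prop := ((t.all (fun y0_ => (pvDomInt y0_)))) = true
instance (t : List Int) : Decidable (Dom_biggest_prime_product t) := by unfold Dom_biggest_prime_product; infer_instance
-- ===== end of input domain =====

-- B re-decomposes A's single stateful scan into a prefix-product table, a candidate
-- filter and a max/first-index selection; same cost, proved equal on nonempty lists.

-- ===== PORT A =====
-- shared helper: the is_prime trial-division loop (identical in Source A and Source B)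
-- fuel-guarded while-loop (fuel n.toNat + 2 always outlasts the loop, which stops once i * i > n)
def pyIsPrimeAux (n : Int) : Nat → Nat → Bool
  | _, 0 => true
  | i, fuel + 1 =>
    if (i : Int) * i ≤ n then
      if PySem.Int.mod n i = 0 then false
      else pyIsPrimeAux n (i + 1) fuel
    else true

def pyIsPrime (n : Int) : Bool :=
  if n < 2 then false else pyIsPrimeAux n 2 (n.toNat + 2)

def biggest_prime_product (t : List Int) : Option Int :=
  -- index = None; best = 1; curr = t[0] if is_prime(t[0]) else 1
  let t0 := PySem.List.pyGetD t 0 0   -- t[0]; Pre_ guarantees t ≠ []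
  let curr0 : Int := if pyIsPrime t0 then t0 else 1
  -- for i in range(1, len(t)): …
  let r := (PySem.List.pyRange 1 (t.length) 1).foldl
    (fun (s : Option Int × Int × Int) i =>
      let ti := PySem.List.pyGetD t i 0
      ((if ti = s.2.2 ∧ s.2.1 < s.2.2 then some i else s.1),
       (if ti = s.2.2 ∧ s.2.1 < s.2.2 then s.2.2 else s.2.1),
       (if pyIsPrime ti then s.2.2 * ti else s.2.2)))
    (none, 1, curr0)
  r.1

-- ===== PORT B =====
def biggest_prime_product_alt (t : List Int) : Option Int :=
  let t0 := PySem.List.pyGetD t 0 0   -- t[0]; Pre_ guarantees t ≠ []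
  let rest := PySem.List.slice t (some 1) none   -- t[1:]
  -- prods = []; p = …; for x in t[1:]: prods.append(p); if is_prime(x): p *= x
  let pr := rest.foldl
    (fun (s : List Int × Int) x =>
      (s.1 ++ [s.2], if pyIsPrime x then s.2 * x else s.2))
    ([], if pyIsPrime t0 then t0 else 1)
  -- candidates = [(i+1, q) for i, (x, q) in enumerate(zip(t[1:], prods)) if x == q and q > 1]
  let candidates := (PySem.List.enumerate (rest.zip pr.1) 0).filterMap
    (fun p => if p.2.1 = p.2.2 ∧ 1 < p.2.2 then some (p.1 + 1, p.2.2) else none)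
  match candidates with
  | [] => none          -- if not candidates: return None
  | _ =>
    -- best = max(q for _, q in candidates)
    match PySem.List.max? (candidates.map (fun p => p.2)) (fun y => y) with
    | none => none      -- unreachable: candidates is nonempty
    | some best =>
      -- return next(i for i, q in candidates if q == best)
      (candidates.find? (fun p => p.2 == best)).map (fun p => p.1)

-- ===== PRECONDITION & SPEC =====
-- Pre_ excludes only the empty list, on which A raises IndexError (t[0]).
def Pre_biggest_prime_product (t : List Int) : Prop := t ≠ []
instance (t : List Int) : Decidable (Pre_biggest_prime_product t) := by unfold Pre_biggest_prime_product; infer_instance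
def pvWitness_biggest_prime_product : List Int := [2, 3, 6, 5, 30]
def Spec_biggest_prime_product (t : List Int) (out : Option Int) : Prop := out = biggest_prime_product_alt t
instance (t : List Int) (out : Option Int) : Decidable (Spec_biggest_prime_product t out) := by unfold Spec_biggest_prime_product; infer_instance

-- ===== CLAIM (what is proved, stated in full; the proofs are below) =====
def Claim_equal_biggest_prime_product : Prop := ∀ (t : List Int), Dom_biggest_prime_product t → Pre_biggest_prime_product t → Spec_biggest_prime_product t (biggest_prime_product t)

-- ===== LEMMAS AND PROOFS =====

-- abstract form of A's loop (structural recursion over the tail of t)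
def pvLoopA : List Int → (Option Int × Int × Int) → Int → (Option Int × Int × Int)
  | [], s, _ => s
  | x :: xs, s, i =>
      pvLoopA xs
        ((if x = s.2.2 ∧ s.2.1 < s.2.2 then some i else s.1),
         (if x = s.2.2 ∧ s.2.1 < s.2.2 then s.2.2 else s.2.1),
         (if pyIsPrime x then s.2.2 * x else s.2.2))
        (i + 1)

-- strict-record scan over an explicit candidate list
def pvScan : List (Int × Int) → Option Int → Int → Option Int
  | [], idx, _ => idx
  | (i, q) :: rest, idx, b =>
      if b < q then pvScan rest (some i) q else pvScan rest idx b

-- positions where the element equals the running prime product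
def pvCands (c : Int) (i : Int) : List Int → List (Int × Int)
  | [] => []
  | x :: xs =>
      (if x = c then [(i, c)] else []) ++
        pvCands (if pyIsPrime x then c * x else c) (i + 1) xs

-- ditto, keeping only products > 1 (B's candidate list)
def pvCandsF (c : Int) (i : Int) : List Int → List (Int × Int)
  | [] => []
  | x :: xs =>
      (if x = c ∧ 1 < c then [(i, c)] else []) ++
        pvCandsF (if pyIsPrime x then c * x else c) (i + 1) xs

-- the prefix-product table B builds
def pvProds (c : Int) : List Int → List Int
  | [] => []
  | x :: xs => c :: pvProds (if pyIsPrime x then c * x else c) xs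

theorem pvBridgeA (t : List Int) : ∀ (n k : Nat) (s : Option Int × Int × Int),
    t.length = k + n →
    (PySem.List.pyRange (k : Int) (t.length : Int) 1).foldl
      (fun (s : Option Int × Int × Int) i =>
        let ti := PySem.List.pyGetD t i 0
        ((if ti = s.2.2 ∧ s.2.1 < s.2.2 then some i else s.1),
         (if ti = s.2.2 ∧ s.2.1 < s.2.2 then s.2.2 else s.2.1),
         (if pyIsPrime ti then s.2.2 * ti else s.2.2))) s
      = pvLoopA (t.drop k) s (k : Int) := by
  intro n
  induction n with
  | zero =>
    intro k s hk
    have h1 : (PySem.List.pyRange (k : Int) (t.length : Int) 1) = [] := by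
      rw [PySem.List.pyRange_one]
      have : ((t.length : Int) - k).toNat = 0 := by omega
      simp [this]
    have h2 : t.drop k = [] := List.drop_eq_nil_of_le (by omega)
    simp [h1, h2, pvLoopA]
  | succ n ih =>
    intro k s hk
    have hlt : k < t.length := by omega
    have h1 : (PySem.List.pyRange (k : Int) (t.length : Int) 1)
        = (k : Int) :: PySem.List.pyRange ((k : Int) + 1) (t.length : Int) 1 :=
      PySem.List.pyRange_one_cons (by exact_mod_cast hlt)
    have h2 : t.drop k = t[k] :: t.drop (k + 1) := List.drop_eq_getElem_cons hlt
    have h3 : PySem.List.pyGetD t (k : Int) 0 = t[k] := by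
      rw [PySem.List.pyGetD_natCast]
      exact List.getD_eq_getElem t 0 hlt
    rw [h1, h2]
    simp only [List.foldl_cons, pvLoopA, h3]
    have h4 : ((k : Int) + 1) = ((k + 1 : Nat) : Int) := by push_cast; ring
    rw [h4, ih (k + 1) _ (by omega)]

theorem pvLoopA_eq_scan : ∀ (xs : List Int) (idx : Option Int) (best curr : Int) (i : Int),
    (pvLoopA xs (idx, best, curr) i).1 = pvScan (pvCands curr i xs) idx best := by
  intro xs
  induction xs with
  | nil => intro idx best curr i; simp [pvLoopA, pvCands, pvScan]
  | cons x xs ih =>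
    intro idx best curr i
    by_cases hx : x = curr
    · by_cases hb : best < curr
      · simp [pvLoopA, pvCands, pvScan, hx, hb, ih]
      · simp [pvLoopA, pvCands, pvScan, hx, hb, ih]
    · simp [pvLoopA, pvCands, hx, ih]

theorem pvCandsF_eq_filter : ∀ (xs : List Int) (c i : Int),
    pvCandsF c i xs = (pvCands c i xs).filter (fun p => decide (1 < p.2)) := by
  intro xs
  induction xs with
  | nil => intro c i; simp [pvCandsF, pvCands]
  | cons x xs ih =>
    intro c i
    by_cases hx : x = c
    · by_cases hc : (1 : Int) < c
      · simp [pvCandsF, pvCands, hx, hc, ih]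
      · simp [pvCandsF, pvCands, hx, hc, ih]
    · simp [pvCandsF, pvCands, hx, ih]

theorem pvScan_filter : ∀ (L : List (Int × Int)) (idx : Option Int) (b : Int), 1 ≤ b →
    pvScan L idx b = pvScan (L.filter (fun p => decide (1 < p.2))) idx b := by
  intro L
  induction L with
  | nil => intro idx b hb; rfl
  | cons p L ih =>
    intro idx b hb
    obtain ⟨i, q⟩ := p
    by_cases hq : (1 : Int) < q
    · by_cases hbq : b < q
      · simp [pvScan, hq, hbq]; exact ih _ _ (by omega)
      · simp [pvScan, hq, hbq]; exact ih _ _ hb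
    · have hbq : ¬ b < q := by omega
      simp [pvScan, hq, hbq]; exact ih _ _ hb

theorem pvScan_eq_find : ∀ (L : List (Int × Int)) (idx : Option Int) (b : Int),
    pvScan L idx b =
      if b < (L.map (fun p => p.2)).foldl max b
      then (L.find? (fun p => p.2 == (L.map (fun p => p.2)).foldl max b)).map (fun p => p.1)
      else idx := by
  intro L
  induction L with
  | nil => intro idx b; simp [pvScan]
  | cons p L ih =>
    intro idx b
    obtain ⟨i, q⟩ := p
    have hge : q ≤ (L.map (fun p => p.2)).foldl max q :=
      (PySem.List.le_foldl_max (L.map (fun p => p.2)) q).1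
    by_cases hbq : b < q
    · have hmax : max b q = q := by omega
      simp only [pvScan, if_pos hbq, List.map_cons, List.foldl_cons, hmax, ih]
      by_cases hm : q < (L.map (fun p => p.2)).foldl max q
      · have hb : b < (L.map (fun p => p.2)).foldl max q := by omega
        have hne : ¬ (q == (L.map (fun p => p.2)).foldl max q) = true := by
          simp; omega
        simp [hm, hb, List.find?, hne]
      · have heq : (L.map (fun p => p.2)).foldl max q = q := by omega
        rw [heq] at *
        simp [hbq, List.find?]
    · have hmax : max b q = b := by omega
      have hgeb : b ≤ (L.map (fun p => p.2)).foldl max b :=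
        (PySem.List.le_foldl_max (L.map (fun p => p.2)) b).1
      simp only [pvScan, if_neg hbq, List.map_cons, List.foldl_cons, hmax, ih]
      by_cases hm : b < (L.map (fun p => p.2)).foldl max b
      · have hne : ¬ (q == (L.map (fun p => p.2)).foldl max b) = true := by
          simp; omega
        simp [hm, List.find?, hne]
      · simp [hm]

theorem pvProdsB : ∀ (xs : List Int) (acc : List Int) (c : Int),
    xs.foldl (fun (s : List Int × Int) x =>
        (s.1 ++ [s.2], if pyIsPrime x then s.2 * x else s.2)) (acc, c)
      = (acc ++ pvProds c xs,
         xs.foldl (fun c x => if pyIsPrime x then c * x else c) c) := by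
  intro xs
  induction xs with
  | nil => intro acc c; simp [pvProds]
  | cons x xs ih =>
    intro acc c
    simp only [List.foldl_cons, pvProds, ih]
    simp

theorem pvCandsB : ∀ (xs : List Int) (c : Int) (s : Int),
    (PySem.List.enumerate (xs.zip (pvProds c xs)) s).filterMap
      (fun p => if p.2.1 = p.2.2 ∧ 1 < p.2.2 then some (p.1 + 1, p.2.2) else none)
      = pvCandsF c (s + 1) xs := by
  intro xs
  induction xs with
  | nil => intro c s; simp [pvProds, pvCandsF, PySem.List.enumerate_nil]
  | cons x xs ih =>
    intro c s
    simp only [pvProds, List.zip_cons_cons, PySem.List.enumerate_cons, List.filterMap_cons]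
    by_cases hx : x = c ∧ (1 : Int) < c
    · simp [pvCandsF, hx, ih]
    · simp [pvCandsF, hx, ih]

theorem pvCandsF_gt_one : ∀ (xs : List Int) (c i : Int) (p : Int × Int),
    p ∈ pvCandsF c i xs → 1 < p.2 := by
  intro xs
  induction xs with
  | nil => intro c i p hp; simp [pvCandsF] at hp
  | cons x xs ih =>
    intro c i p hp
    simp only [pvCandsF, List.mem_append] at hp
    rcases hp with hp | hp
    · by_cases hx : x = c ∧ (1 : Int) < c
      · simp [hx] at hp; subst hp; exact hx.2
      · simp [hx] at hp
    · exact ih _ _ _ hp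

theorem pvFinal_eq (t : List Int) (a : Int) (ts : List Int) (ht : t = a :: ts) :
    biggest_prime_product t = pvScan (pvCandsF (if pyIsPrime a then a else 1) 1 ts) none 1 := by
  subst ht
  have hlen : (a :: ts).length = 1 + ts.length := by simp; omega
  simp only [biggest_prime_product, PySem.List.pyGetD_zero_cons]
  have hb := pvBridgeA (a :: ts) ts.length 1 (none, 1, if pyIsPrime a then a else 1) hlen
  have hc : ((1 : Nat) : Int) = (1 : Int) := by norm_num
  rw [hc] at hb
  rw [hb]
  simp only [List.drop_succ_cons, List.drop_zero]
  rw [pvLoopA_eq_scan, pvScan_filter _ none 1 (le_refl 1), ← pvCandsF_eq_filter]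

theorem pvAltFinal_eq (t : List Int) (a : Int) (ts : List Int) (ht : t = a :: ts) :
    biggest_prime_product_alt t =
      (match pvCandsF (if pyIsPrime a then a else 1) 1 ts with
       | [] => none
       | c :: cs =>
          ((c :: cs).find? (fun p => p.2 == (cs.map (fun p => p.2)).foldl max c.2)).map
            (fun p => p.1)) := by
  subst ht
  simp only [biggest_prime_product_alt, PySem.List.pyGetD_zero_cons,
    PySem.List.slice_from_one, List.tail_cons]
  rw [pvProdsB ts [] (if pyIsPrime a then a else 1)]
  simp only [List.nil_append]
  rw [pvCandsB ts (if pyIsPrime a then a else 1) 0]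
  simp only [zero_add]
  cases hC : pvCandsF (if pyIsPrime a then a else 1) 1 ts with
  | nil => simp
  | cons c cs =>
    simp only [List.map_cons, PySem.List.max?_id_cons]

-- ===== VERDICT (by name: the statement is the Claim_ definition above) =====
theorem biggest_prime_product_spec : Claim_equal_biggest_prime_product := by
  intro t _hd hpre
  unfold Spec_biggest_prime_product
  obtain ⟨a, ts, rfl⟩ : ∃ a ts, t = a :: ts := by
    cases t with
    | nil => exact absurd rfl hpre
    | cons a ts => exact ⟨a, ts, rfl⟩
  rw [pvFinal_eq (a :: ts) a ts rfl, pvAltFinal_eq (a :: ts) a ts rfl]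
  cases hC : pvCandsF (if pyIsPrime a then a else 1) 1 ts with
  | nil => simp [pvScan]
  | cons c cs =>
    have hgt : ∀ p ∈ c :: cs, (1 : Int) < p.2 := by
      intro p hp
      exact pvCandsF_gt_one ts _ _ p (hC ▸ hp)
    have hc2 : (1 : Int) < c.2 := hgt c (by simp)
    rw [pvScan_eq_find]
    have hM : ((c :: cs).map (fun p => p.2)).foldl max 1
        = (cs.map (fun p => p.2)).foldl max c.2 := by
      simp only [List.map_cons, List.foldl_cons]
      have : max (1 : Int) c.2 = c.2 := by omega
      rw [this]
    have hge : c.2 ≤ (cs.map (fun p => p.2)).foldl max c.2 :=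
      (PySem.List.le_foldl_max (cs.map (fun p => p.2)) c.2).1
    rw [hM, if_pos (by omega)]
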